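-- pv_equiv track=rewrite | github.com/jamescalixto/spelling-bee | data/process.py | is_boring
-- ===== SOURCE A (Python) =====
-- from itertools import permutations
--
-- def is_boring(arr):
--     """Given an array of pangrams, return True if any two of those pangrams are boring, False otherwise."""
--     arr = [s.lower() for s in arr]
--     for i, j in permutations(arr, r=2):
--         if set(i) == set(j) and (
--             i == j + "s"
--             or j == i + "s"
--             or i == j + "r"
--             or j == i + "r"
--             or i == j + "d"
--             or j == i + "d"
--         ):
--             return True
--     return False
-- ===== SOURCE B (Python) =====
-- def is_boring(arr):
--     """Given an array of pangrams, return True if any two of those pangrams are boring, False otherwise."""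
--     buckets = {}
--     for s in arr:
--         s = s.lower()
--         buckets.setdefault("".join(sorted(set(s))), set()).add(s)
--     for bucket in buckets.values():
--         for w in bucket:
--             if w and w[-1] in "srd" and w[:-1] in bucket:
--                 return True
--     return False
-- ===== Notes on version B (the rewrite author's own statement) =====
-- stated objective: faster
-- what changed: Replaced the all-pairs itertools.permutations scan with a single grouping pass into a dict of letter-set-keyed buckets of distinct lowered words, then a per-bucket check that a word ending in s/r/d has its trailing-letter-stripped form in the same bucket.
import Mathlib
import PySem

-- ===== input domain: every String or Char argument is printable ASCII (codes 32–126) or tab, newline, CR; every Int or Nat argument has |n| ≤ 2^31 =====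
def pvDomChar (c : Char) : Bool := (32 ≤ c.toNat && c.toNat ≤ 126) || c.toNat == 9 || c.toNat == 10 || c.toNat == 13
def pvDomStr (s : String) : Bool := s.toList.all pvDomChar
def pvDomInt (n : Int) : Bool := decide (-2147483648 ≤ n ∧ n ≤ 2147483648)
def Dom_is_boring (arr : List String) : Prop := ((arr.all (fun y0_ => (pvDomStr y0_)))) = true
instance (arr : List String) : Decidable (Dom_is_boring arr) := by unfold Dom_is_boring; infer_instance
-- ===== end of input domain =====

-- B replaces A's all-pairs itertools.permutations scan by one grouping pass into
-- letter-set-keyed buckets plus a per-bucket trailing-letter membership check.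
-- Strings are ported as List Char throughout (PySem.Chars).

-- ===== PORT A =====
def is_boring (arr : List String) : Bool :=
  let arr' := arr.map (fun s => PySem.Chars.lower s.toList)   -- arr = [s.lower() for s in arr]
  (PySem.List.permutations arr' 2).any (fun p =>              -- for i, j in permutations(arr, r=2)
    match p with
    | [i, j] =>
        PySem.Set.equal (PySem.Set.ofList i) (PySem.Set.ofList j) &&  -- set(i) == set(j)
        (i == j ++ ['s'] || j == i ++ ['s'] ||
         i == j ++ ['r'] || j == i ++ ['r'] ||
         i == j ++ ['d'] || j == i ++ ['d'])
    | _ => false)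

-- ===== PORT B =====
-- the bucket key "".join(sorted(set(s))) (equality of these keys = equality of frozensets)
def isbKey (cs : List Char) : List Char :=
  PySem.List.sorted (PySem.Set.ofList cs) (fun x => x) false

def is_boring_alt (arr : List String) : Bool :=
  let buckets : PySem.Dict (List Char) (PySem.Set (List Char)) :=
    arr.foldl (fun d s =>
      let cs := PySem.Chars.lower s.toList                    -- s = s.lower()
      d.modify (isbKey cs) PySem.Set.empty                    -- buckets.setdefault(key, set())
        (fun b => PySem.Set.add b cs)) PySem.Dict.empty       --   .add(s)
  buckets.values.any (fun bucket =>                           -- for bucket in buckets.values()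
    bucket.any (fun w =>                                      --   for w in bucket
      !w.isEmpty &&                                           -- w
      (match PySem.List.pyGet? w (-1) with                    -- w[-1] in "srd"
       | some c => (['s', 'r', 'd'] : List Char).contains c
       | none => false) &&
      PySem.Set.contains bucket (PySem.List.slice w none (some (-1)))))  -- w[:-1] in bucket

-- ===== PRECONDITION & SPEC =====
def Spec_is_boring (arr : List String) (out : Bool) : Prop := out = is_boring_alt arr
instance (arr : List String) (out : Bool) : Decidable (Spec_is_boring arr out) := by unfold Spec_is_boring; infer_instance

-- ===== CLAIM (what is proved, stated in full; the proofs are below) =====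
def Claim_equal_is_boring : Prop := ∀ (arr : List String), Dom_is_boring arr → Spec_is_boring arr (is_boring arr)

-- ===== LEMMAS AND PROOFS =====

-- the condition both programs detect, over the lowered char-list words M
def isbCommon (M : List (List Char)) : Prop :=
  ∃ v w, v ∈ M ∧ w ∈ M ∧ (∀ x, x ∈ v ↔ x ∈ w) ∧
    ∃ c, c ∈ (['s', 'r', 'd'] : List Char) ∧ w = v ++ [c]

theorem isb_permutations_succ {α : Type} (xs : List α) (r : Nat) :
    PySem.List.permutations xs (r + 1)
      = (List.range xs.length).flatMap (fun i =>
          match xs[i]? with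
          | none => []
          | some x => (PySem.List.permutations (xs.eraseIdx i) r).map (fun p => x :: p)) := by
  conv_lhs => rw [PySem.List.permutations]
  rfl

theorem isb_mem_permutations_one {α : Type} (ys : List α) (b : α) :
    [b] ∈ PySem.List.permutations ys 1 ↔ b ∈ ys := by
  rw [isb_permutations_succ]
  simp only [List.mem_flatMap, List.mem_range]
  constructor
  · rintro ⟨i, hi, hmem⟩
    rw [List.getElem?_eq_getElem hi] at hmem
    simp only [PySem.List.permutations_zero, List.map_cons, List.map_nil, List.mem_singleton] at hmem
    cases hmem
    exact List.getElem_mem hi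
  · intro hb
    obtain ⟨i, hi, rfl⟩ := List.mem_iff_getElem.mp hb
    exact ⟨i, hi, by simp [List.getElem?_eq_getElem hi, PySem.List.permutations_zero]⟩

theorem isb_mem_permutations_two {α : Type} (xs : List α) (a b : α)
    (ha : a ∈ xs) (hb : b ∈ xs) (hne : a ≠ b) :
    [a, b] ∈ PySem.List.permutations xs 2 := by
  rw [isb_permutations_succ]
  simp only [List.mem_flatMap, List.mem_range]
  obtain ⟨i, hi, rfl⟩ := List.mem_iff_getElem.mp ha
  refine ⟨i, hi, ?_⟩
  rw [List.getElem?_eq_getElem hi]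
  simp only [List.mem_map]
  refine ⟨[b], ?_, rfl⟩
  rw [isb_mem_permutations_one]
  rw [List.mem_eraseIdx_iff_getElem]
  obtain ⟨j, hj, rfl⟩ := List.mem_iff_getElem.mp hb
  exact ⟨j, hj, fun h => hne (by subst h; rfl), rfl⟩

theorem isb_key_eq_iff (v w : List Char) :
    isbKey v = isbKey w ↔ (∀ x, x ∈ v ↔ x ∈ w) := by
  unfold isbKey
  rw [PySem.List.sorted_id_eq_sorted_id_iff_perm,
    List.perm_ext_iff_of_nodup (PySem.Set.nodup_ofList v) (PySem.Set.nodup_ofList w)]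
  simp only [PySem.Set.mem_ofList]

theorem isb_A_iff (arr : List String) :
    is_boring arr = true ↔ isbCommon (arr.map (fun s => PySem.Chars.lower s.toList)) := by
  unfold is_boring isbCommon
  set M := arr.map (fun s => PySem.Chars.lower s.toList) with hM
  rw [List.any_eq_true]
  constructor
  · rintro ⟨p, hp, hf⟩
    match p, hf with
    | [i, j], hf =>
      have hi : i ∈ M := PySem.List.mem_of_mem_of_mem_permutations hp (by simp)
      have hj : j ∈ M := PySem.List.mem_of_mem_of_mem_permutations hp (by simp)
      simp only [Bool.and_eq_true, Bool.or_eq_true, beq_iff_eq] at hf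
      obtain ⟨hset, hor⟩ := hf
      have hiff : ∀ x, x ∈ i ↔ x ∈ j := by
        intro x
        have := (PySem.Set.equal_iff _ _).mp hset x
        simpa [PySem.Set.mem_ofList] using this
      rcases hor with ((((h | h) | h) | h) | h) | h
      · exact ⟨j, i, hj, hi, fun x => (hiff x).symm, 's', by simp, h⟩
      · exact ⟨i, j, hi, hj, hiff, 's', by simp, h⟩
      · exact ⟨j, i, hj, hi, fun x => (hiff x).symm, 'r', by simp, h⟩
      · exact ⟨i, j, hi, hj, hiff, 'r', by simp, h⟩
      · exact ⟨j, i, hj, hi, fun x => (hiff x).symm, 'd', by simp, h⟩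
      · exact ⟨i, j, hi, hj, hiff, 'd', by simp, h⟩
  · rintro ⟨v, w, hv, hw, hiff, c, hc, rfl⟩
    have hne : v ++ [c] ≠ v := by
      intro h
      have := congrArg List.length h
      simp at this
    refine ⟨[v ++ [c], v], isb_mem_permutations_two M _ _ hw hv hne, ?_⟩
    have hset : PySem.Set.equal (PySem.Set.ofList (v ++ [c])) (PySem.Set.ofList v) = true := by
      rw [PySem.Set.equal_iff]
      intro x
      simp only [PySem.Set.mem_ofList]
      exact (hiff x).symm
    simp only [hset, Bool.true_and, Bool.or_eq_true, beq_iff_eq]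
    fin_cases hc
    · tauto
    · tauto
    · tauto

theorem isb_getD_fold (l : List String) (d : PySem.Dict (List Char) (PySem.Set (List Char)))
    (k : List Char) :
    (l.foldl (fun d s =>
        d.modify (isbKey (PySem.Chars.lower s.toList)) PySem.Set.empty
          (fun b => PySem.Set.add b (PySem.Chars.lower s.toList))) d).getD k PySem.Set.empty
      = ((l.map (fun s => PySem.Chars.lower s.toList)).filter
          (fun cs => isbKey cs == k)).foldl PySem.Set.add (d.getD k PySem.Set.empty) := by
  induction l generalizing d with
  | nil => rfl
  | cons s t ih =>
    simp only [List.foldl_cons, List.map_cons, List.filter_cons]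
    rw [ih]
    by_cases h : isbKey (PySem.Chars.lower s.toList) = k
    · rw [h, if_pos (by simp)]
      rw [PySem.Dict.getD_modify_self]
      rfl
    · rw [if_neg (by simp [h]), PySem.Dict.getD_modify_of_ne _ _ _ (Ne.symm h)]

theorem isb_B_iff (arr : List String) :
    is_boring_alt arr = true ↔ isbCommon (arr.map (fun s => PySem.Chars.lower s.toList)) := by
  simp only [is_boring_alt]
  set M := arr.map (fun s => PySem.Chars.lower s.toList) with hM
  set buckets := arr.foldl (fun d s =>
      d.modify (isbKey (PySem.Chars.lower s.toList)) PySem.Set.empty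
        (fun b => PySem.Set.add b (PySem.Chars.lower s.toList))) PySem.Dict.empty with hB
  have hkeys : buckets.keys = PySem.Set.ofList (M.map isbKey) := by
    rw [hB, PySem.Dict.keys_foldl_modify_key arr
      (fun s => isbKey (PySem.Chars.lower s.toList)) PySem.Set.empty
      (fun d s => fun b => PySem.Set.add b (PySem.Chars.lower s.toList)) PySem.Dict.empty]
    rw [PySem.Set.ofList_eq_foldl]
    simp [hM, List.map_map, Function.comp_def, PySem.Set.update, PySem.Dict.empty, PySem.Dict.keys]
  have hnd : buckets.keys.Nodup := by
    rw [hB]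
    exact PySem.Dict.nodup_keys_foldl_modify_key arr
      (fun s => isbKey (PySem.Chars.lower s.toList)) PySem.Set.empty
      (fun d s => fun b => PySem.Set.add b (PySem.Chars.lower s.toList)) PySem.Dict.empty
      (by simp [PySem.Dict.empty, PySem.Dict.keys])
  have hbucket : ∀ k, buckets.getD k PySem.Set.empty
      = PySem.Set.ofList (M.filter (fun cs => isbKey cs == k)) := by
    intro k
    rw [hB, isb_getD_fold, PySem.Set.ofList_eq_foldl]
    rfl
  rw [PySem.Dict.values_eq_map_keys buckets hnd PySem.Set.empty, hkeys, List.any_map]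
  rw [List.any_eq_true]
  constructor
  · rintro ⟨k, hk, hg⟩
    simp only [Function.comp_apply, hbucket, List.any_eq_true] at hg
    obtain ⟨w, hwmem, hw⟩ := hg
    rw [PySem.Set.mem_ofList, List.mem_filter, beq_iff_eq] at hwmem
    obtain ⟨hwM, hwk⟩ := hwmem
    simp only [Bool.and_eq_true] at hw
    obtain ⟨⟨hne, hmatch⟩, hcont⟩ := hw
    have hwne : w ≠ [] := by simpa using hne
    rw [PySem.List.pyGet?_neg_one, List.getLast?_eq_some_getLast hwne] at hmatch
    have hc : w.getLast hwne ∈ (['s', 'r', 'd'] : List Char) := by simpa using hmatch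
    rw [PySem.List.slice_to_neg_one, PySem.Set.contains_iff, PySem.Set.mem_ofList,
      List.mem_filter, beq_iff_eq] at hcont
    obtain ⟨hdM, hdk⟩ := hcont
    refine ⟨w.dropLast, w, hdM, hwM, ?_, w.getLast hwne, hc,
      (List.dropLast_append_getLast hwne).symm⟩
    exact (isb_key_eq_iff _ _).mp (hdk.trans hwk.symm)
  · rintro ⟨v, w, hv, hw, hiff, c, hc, rfl⟩
    refine ⟨isbKey (v ++ [c]), ?_, ?_⟩
    · rw [PySem.Set.mem_ofList]
      exact List.mem_map_of_mem hw
    · simp only [Function.comp_apply, hbucket, List.any_eq_true]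
      refine ⟨v ++ [c], ?_, ?_⟩
      · rw [PySem.Set.mem_ofList, List.mem_filter]
        exact ⟨hw, by simp⟩
      · simp only [Bool.and_eq_true]
        refine ⟨⟨by simp, ?_⟩, ?_⟩
        · rw [PySem.List.pyGet?_neg_one, List.getLast?_concat]
          simpa using hc
        · rw [PySem.List.slice_to_neg_one, List.dropLast_concat,
            PySem.Set.contains_iff, PySem.Set.mem_ofList, List.mem_filter, beq_iff_eq]
          exact ⟨hv, (isb_key_eq_iff _ _).mpr hiff⟩

-- ===== VERDICT (by name: the statement is the Claim_ definition above) =====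
theorem is_boring_spec : Claim_equal_is_boring := by
  intro arr _
  unfold Spec_is_boring
  rw [Bool.eq_iff_iff, isb_A_iff, isb_B_iff]
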